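-- pv_equiv track=rewrite | github.com/Bhuvansh-Goyal-IITB/Wave-Function-Collapse | utils.py | create_adjacency
-- ===== SOURCE A (Python) =====
-- def create_adjacency(patterns):
--     adjacency = tuple(tuple(set() for _ in range(4)) for _ in range(len(patterns)))
--
--     for i, this_pattern in enumerate(patterns):
--         for j, other_pattern in enumerate(patterns):
--             if [[val for x, val in enumerate(row[1:])] for y, row in enumerate(this_pattern)] == [[val for x, val in enumerate(row[:-1])] for y, row in enumerate(other_pattern)]:
--                 adjacency[i][1].add(j)
--                 adjacency[j][3].add(i)
--             if [[val for x, val in enumerate(row)] for y, row in enumerate(this_pattern[:-1])] == [[val for x, val in enumerate(row)] for y, row in enumerate(other_pattern[1:])]: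
--                 adjacency[i][0].add(j)
--                 adjacency[j][2].add(i)
--
--     return adjacency
-- ===== SOURCE B (Python) =====
-- def create_adjacency(patterns):
--     def index(keyfn):
--         d = {}
--         for j, p in enumerate(patterns):
--             d.setdefault(keyfn(p), []).append(j)
--         return d
--
--     cols_drop_last = lambda p: tuple(tuple(row[:-1]) for row in p)
--     cols_drop_first = lambda p: tuple(tuple(row[1:]) for row in p)
--     rows_drop_last = lambda p: tuple(tuple(row) for row in p[:-1])
--     rows_drop_first = lambda p: tuple(tuple(row) for row in p[1:])
--
--     by_cdl = index(cols_drop_last)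
--     by_cdf = index(cols_drop_first)
--     by_rdl = index(rows_drop_last)
--     by_rdf = index(rows_drop_first)
--
--     return tuple(
--         (set(by_rdf.get(rows_drop_last(p), [])),
--          set(by_cdl.get(cols_drop_first(p), [])),
--          set(by_rdl.get(rows_drop_first(p), [])),
--          set(by_cdf.get(cols_drop_last(p), [])))
--         for p in patterns)
-- ===== Notes on version B (the rewrite author's own statement) =====
-- stated objective: faster
-- what changed: Replaces the all-pairs O(n^2) edge comparison with four hash indexes keyed by each pattern's overlap slices, so each pattern's neighbours are found by dictionary lookup instead of comparing against every other pattern.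
import Mathlib
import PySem

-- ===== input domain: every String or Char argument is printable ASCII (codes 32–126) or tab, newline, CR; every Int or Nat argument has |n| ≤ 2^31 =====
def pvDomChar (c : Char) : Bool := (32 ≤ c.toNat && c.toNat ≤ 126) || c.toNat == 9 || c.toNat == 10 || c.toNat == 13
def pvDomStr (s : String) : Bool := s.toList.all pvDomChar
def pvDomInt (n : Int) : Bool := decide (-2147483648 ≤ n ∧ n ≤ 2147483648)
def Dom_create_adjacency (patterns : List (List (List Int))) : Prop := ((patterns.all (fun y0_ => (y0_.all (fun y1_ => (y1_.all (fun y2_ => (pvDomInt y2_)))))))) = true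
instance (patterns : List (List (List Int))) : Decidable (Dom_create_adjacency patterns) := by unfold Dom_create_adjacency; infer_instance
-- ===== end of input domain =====

-- B builds four hash indexes keyed by a pattern's overlap slices and reads each
-- pattern's neighbour sets by dictionary lookup, instead of A's all-pairs comparison.

-- ===== PORT A =====
-- A's `[[val for x, val in enumerate(row[1:])] for y, row in enumerate(this_pattern)]` etc.
def pvA_cdf (p : List (List Int)) : List (List Int) :=
  (PySem.List.enumerate p).map (fun yr => (PySem.List.enumerate (PySem.List.slice yr.2 (some 1) none)).map (fun xv => xv.2))
def pvA_cdl (p : List (List Int)) : List (List Int) :=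
  (PySem.List.enumerate p).map (fun yr => (PySem.List.enumerate (PySem.List.slice yr.2 none (some (-1)))).map (fun xv => xv.2))
def pvA_rdl (p : List (List Int)) : List (List Int) :=
  (PySem.List.enumerate (PySem.List.slice p none (some (-1)))).map (fun yr => (PySem.List.enumerate yr.2).map (fun xv => xv.2))
def pvA_rdf (p : List (List Int)) : List (List Int) :=
  (PySem.List.enumerate (PySem.List.slice p (some 1) none)).map (fun yr => (PySem.List.enumerate yr.2).map (fun xv => xv.2))

-- adjacency[i][d].add(v)  (each cell is a Python set, kept as a distinct-element list)
def pvAddAt (adj : List (List (List Int))) (i : Nat) (d : Nat) (v : Int) : List (List (List Int)) :=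
  adj.modify i (fun r => r.modify d (fun s => PySem.Set.add s v))

def create_adjacency (patterns : List (List (List Int))) : List (List (List Int)) :=
  let adjacency : List (List (List Int)) := patterns.map (fun _ => [[], [], [], []])
  (PySem.List.enumerate patterns).foldl (fun adj it =>
    (PySem.List.enumerate patterns).foldl (fun adj jo =>
      let adj := if pvA_cdf it.2 = pvA_cdl jo.2 then
          pvAddAt (pvAddAt adj it.1.toNat 1 jo.1) jo.1.toNat 3 it.1 else adj
      if pvA_rdl it.2 = pvA_rdf jo.2 then
          pvAddAt (pvAddAt adj it.1.toNat 0 jo.1) jo.1.toNat 2 it.1 else adj) adj) adjacency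

-- ===== PORT B =====
-- B's slice keys (the Python tuple(...) conversions are identities under the type convention)
def pvB_cdl (p : List (List Int)) : List (List Int) := p.map (fun row => PySem.List.slice row none (some (-1)))
def pvB_cdf (p : List (List Int)) : List (List Int) := p.map (fun row => PySem.List.slice row (some 1) none)
def pvB_rdl (p : List (List Int)) : List (List Int) := (PySem.List.slice p none (some (-1))).map (fun row => row)
def pvB_rdf (p : List (List Int)) : List (List Int) := (PySem.List.slice p (some 1) none).map (fun row => row)

-- d.setdefault(keyfn(p), []).append(j) over enumerate(patterns)
def pvIndexBy (patterns : List (List (List Int))) (keyfn : List (List Int) → List (List Int)) :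
    PySem.Dict (List (List Int)) (List Int) :=
  (PySem.List.enumerate patterns).foldl
    (fun d jp => d.insert (keyfn jp.2) (d.getD (keyfn jp.2) [] ++ [jp.1])) ⟨[]⟩

def create_adjacency_alt (patterns : List (List (List Int))) : List (List (List Int)) :=
  let by_cdl := pvIndexBy patterns pvB_cdl
  let by_cdf := pvIndexBy patterns pvB_cdf
  let by_rdl := pvIndexBy patterns pvB_rdl
  let by_rdf := pvIndexBy patterns pvB_rdf
  patterns.map (fun p =>
    [PySem.Set.ofList (by_rdf.getD (pvB_rdl p) []),
     PySem.Set.ofList (by_cdl.getD (pvB_cdf p) []),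
     PySem.Set.ofList (by_rdl.getD (pvB_rdf p) []),
     PySem.Set.ofList (by_cdf.getD (pvB_cdl p) [])])

-- ===== PRECONDITION & SPEC =====
def Spec_create_adjacency (patterns : List (List (List Int))) (out : List (List (List Int))) : Prop := out = create_adjacency_alt patterns
instance (patterns : List (List (List Int))) (out : List (List (List Int))) : Decidable (Spec_create_adjacency patterns out) := by unfold Spec_create_adjacency; infer_instance

-- ===== CLAIM (what is proved, stated in full; the proofs are below) =====
def Claim_equal_create_adjacency : Prop := ∀ (patterns : List (List (List Int))), Dom_create_adjacency patterns → Spec_create_adjacency patterns (create_adjacency patterns)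

-- ===== LEMMAS AND PROOFS =====

-- ===== VERDICT (by name: the statement is the Claim_ definition above) =====
-- (proof-side helper definitions and lemmas)

-- enumerate over a pair-projection
lemma pv_map_enum_snd {a b : Type} (l : List a) (f : a → b) :
    (PySem.List.enumerate l).map (fun x => f x.2) = l.map f := by
  have h1 : (PySem.List.enumerate l).map (fun x => f x.2)
      = ((PySem.List.enumerate l).map Prod.snd).map f := by
    rw [List.map_map]; rfl
  rw [h1, PySem.List.map_snd_enumerate]

lemma pv_enum_eq_zipIdx_aux {a : Type} (l : List a) :
    ∀ (s : Nat), PySem.List.enumerate l (s : Int) = (l.zipIdx s).map (fun xk => ((xk.2 : Int), xk.1)) := by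
  induction l with
  | nil => intro s; rfl
  | cons x t ih =>
      intro s
      have hcast : ((s : Int) + 1) = ((s + 1 : Nat) : Int) := by push_cast; ring
      show ((s : Int), x) :: PySem.List.enumerate t ((s : Int) + 1) = _
      rw [hcast, ih (s + 1), List.zipIdx_cons]
      rfl

lemma pv_enum_eq_zipIdx {a : Type} (l : List a) :
    PySem.List.enumerate l = (l.zipIdx).map (fun xk => ((xk.2 : Int), xk.1)) := by
  simpa using pv_enum_eq_zipIdx_aux l 0

lemma pv_map_filter_eq_flatMap {a b : Type} (q : a → Bool) (f : a → b) (l : List a) :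
    (l.filter q).map f = l.flatMap (fun x => if q x then [f x] else []) := by
  induction l with
  | nil => rfl
  | cons x t ih =>
      by_cases h : q x <;> simp [h, ih]

lemma pv_zip_flatMap_none {a b : Type} (g : a → List b) (l : List a) :
    ∀ (s p : Nat), p < s →
      (l.zipIdx s).flatMap (fun xk => if xk.2 = p then g xk.1 else []) = [] := by
  induction l with
  | nil => intro s p _; rfl
  | cons x t ih =>
      intro s p h
      rw [List.zipIdx_cons]
      simp only [List.flatMap_cons]
      rw [if_neg (by omega), ih (s + 1) p (by omega)]
      rfl

lemma pv_zip_flatMap_single {a b : Type} (g : a → List b) (l : List a) :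
    ∀ (s p : Nat), s ≤ p → (h : p - s < l.length) →
      (l.zipIdx s).flatMap (fun xk => if xk.2 = p then g xk.1 else []) = g (l[p - s]'h) := by
  induction l with
  | nil => intro s p _ h; simp at h
  | cons x t ih =>
      intro s p hs h
      rw [List.zipIdx_cons]
      simp only [List.flatMap_cons]
      by_cases hsp : s = p
      · subst hsp
        rw [if_pos rfl, pv_zip_flatMap_none g t (s + 1) s (by omega)]
        simp
      · have h1 : s + 1 ≤ p := by omega
        have h2 : p - (s + 1) < t.length := by
          simp at h; omega
        rw [if_neg (by omega), ih (s + 1) p h1 h2]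
        have : p - s = (p - (s + 1)) + 1 := by omega
        simp only [List.nil_append]
        congr 1
        rw [List.getElem_cons]
        split
        · omega
        · congr 1

lemma pv_enum_flatMap_single {a b : Type} (g : a → List b) (l : List a) (p : Nat) (hp : p < l.length) :
    (PySem.List.enumerate l).flatMap (fun it => if it.1.toNat = p then g it.2 else []) = g (l[p]'hp) := by
  rw [pv_enum_eq_zipIdx, List.flatMap_map]
  have h2 : (fun xk : a × Nat => if (((xk.2 : Int), xk.1)).1.toNat = p then g (((xk.2 : Int), xk.1)).2 else [])
      = (fun xk : a × Nat => if xk.2 = p then g xk.1 else []) := by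
    funext xk; simp
  rw [h2]
  have := pv_zip_flatMap_single g l 0 p (by omega) (by simpa using hp)
  simpa using this

-- selection of indices of patterns satisfying q, in order
def pvSel (pats : List (List (List Int))) (q : List (List Int) → Bool) : List Int :=
  ((PySem.List.enumerate pats).filter (fun jp => q jp.2)).map Prod.fst

lemma pv_sel_nodup (pats : List (List (List Int))) (q : List (List Int) → Bool) :
    (pvSel pats q).Nodup := by
  unfold pvSel
  rw [pv_enum_eq_zipIdx, List.filter_map, List.map_map]
  have h1 : (Prod.fst ∘ fun xk : (List (List Int)) × Nat => ((xk.2 : Int), xk.1))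
      = (fun n : Nat => (n : Int)) ∘ Prod.snd := by funext xk; rfl
  rw [h1, ← List.map_map]
  apply List.Nodup.map Nat.cast_injective
  apply List.Nodup.sublist (List.Sublist.map Prod.snd List.filter_sublist)
  rw [List.zipIdx_map_snd]
  exact List.nodup_range'

lemma pv_sel_eq_flatMap (pats : List (List (List Int))) (q : List (List Int) → Bool) :
    pvSel pats q = (PySem.List.enumerate pats).flatMap (fun jp => if q jp.2 then [jp.1] else []) := by
  unfold pvSel
  rw [pv_map_filter_eq_flatMap]

-- the canonical result both ports compute
def pvCanon (pats : List (List (List Int))) : List (List (List Int)) :=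
  pats.map (fun p =>
    [pvSel pats (fun o => decide (pvB_rdl p = pvB_rdf o)),
     pvSel pats (fun o => decide (pvB_cdf p = pvB_cdl o)),
     pvSel pats (fun t => decide (pvB_rdl t = pvB_rdf p)),
     pvSel pats (fun t => decide (pvB_cdf t = pvB_cdl p))])

-- ==== A-side key functions agree with B-side key functions ====
lemma pv_enum_snd_id (r : List Int) : (PySem.List.enumerate r).map (fun xv => xv.2) = r := by
  have h := pv_map_enum_snd r id
  rwa [List.map_id] at h

lemma pvA_cdf_eq (p : List (List Int)) : pvA_cdf p = pvB_cdf p := by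
  unfold pvA_cdf pvB_cdf
  calc (PySem.List.enumerate p).map (fun yr => (PySem.List.enumerate (PySem.List.slice yr.2 (some 1) none)).map (fun xv => xv.2))
      = (PySem.List.enumerate p).map (fun yr => PySem.List.slice yr.2 (some 1) none) := by
        apply List.map_congr_left; intro yr _; exact pv_enum_snd_id _
    _ = p.map (fun row => PySem.List.slice row (some 1) none) := by
        exact pv_map_enum_snd p (fun row => PySem.List.slice row (some 1) none)

lemma pvA_cdl_eq (p : List (List Int)) : pvA_cdl p = pvB_cdl p := by
  unfold pvA_cdl pvB_cdl
  calc (PySem.List.enumerate p).map (fun yr => (PySem.List.enumerate (PySem.List.slice yr.2 none (some (-1)))).map (fun xv => xv.2))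
      = (PySem.List.enumerate p).map (fun yr => PySem.List.slice yr.2 none (some (-1))) := by
        apply List.map_congr_left; intro yr _; exact pv_enum_snd_id _
    _ = p.map (fun row => PySem.List.slice row none (some (-1))) := by
        exact pv_map_enum_snd p (fun row => PySem.List.slice row none (some (-1)))

lemma pvA_rdl_eq (p : List (List Int)) : pvA_rdl p = pvB_rdl p := by
  unfold pvA_rdl pvB_rdl
  calc (PySem.List.enumerate (PySem.List.slice p none (some (-1)))).map (fun yr => (PySem.List.enumerate yr.2).map (fun xv => xv.2))
      = (PySem.List.enumerate (PySem.List.slice p none (some (-1)))).map (fun yr => yr.2) := by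
        apply List.map_congr_left; intro yr _; exact pv_enum_snd_id _
    _ = (PySem.List.slice p none (some (-1))).map (fun row => row) := by
        exact pv_map_enum_snd (PySem.List.slice p none (some (-1))) (fun row => row)

lemma pvA_rdf_eq (p : List (List Int)) : pvA_rdf p = pvB_rdf p := by
  unfold pvA_rdf pvB_rdf
  calc (PySem.List.enumerate (PySem.List.slice p (some 1) none)).map (fun yr => (PySem.List.enumerate yr.2).map (fun xv => xv.2))
      = (PySem.List.enumerate (PySem.List.slice p (some 1) none)).map (fun yr => yr.2) := by
        apply List.map_congr_left; intro yr _; exact pv_enum_snd_id _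
    _ = (PySem.List.slice p (some 1) none).map (fun row => row) := by
        exact pv_map_enum_snd (PySem.List.slice p (some 1) none) (fun row => row)

-- ==== B equals the canonical form ====
lemma pv_indexBy_getD_aux (keyfn : List (List Int) → List (List Int)) (k : List (List Int)) :
    ∀ (L : List (Int × List (List Int))) (d : PySem.Dict (List (List Int)) (List Int)),
      (L.foldl (fun d jp => d.insert (keyfn jp.2) (d.getD (keyfn jp.2) [] ++ [jp.1])) d).getD k []
        = d.getD k [] ++ (L.filter (fun jp => decide (keyfn jp.2 = k))).map Prod.fst := by
  intro L
  induction L with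
  | nil => intro d; simp
  | cons x t ih =>
      intro d
      simp only [List.foldl_cons, List.filter_cons]
      rw [ih]
      by_cases h : keyfn x.2 = k
      · rw [PySem.Dict.getD_insert]
        simp [h]
      · rw [PySem.Dict.getD_insert]
        simp [h, Ne.symm h]

lemma pv_indexBy_getD (pats : List (List (List Int))) (keyfn : List (List Int) → List (List Int)) (k : List (List Int)) :
    (pvIndexBy pats keyfn).getD k [] = pvSel pats (fun o => decide (k = keyfn o)) := by
  unfold pvIndexBy pvSel
  rw [pv_indexBy_getD_aux]
  have : (PySem.Dict.mk (κ := List (List Int)) (ν := List Int) []).getD k [] = [] := rfl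
  rw [this]
  simp only [List.nil_append]
  congr 1
  apply List.filter_congr
  intro jp _
  simp [eq_comm]

lemma pv_ofList_aux : ∀ (l s : List Int), (s ++ l).Nodup →
    l.foldl PySem.Set.add s = s ++ l := by
  intro l
  induction l with
  | nil => intro s _; simp
  | cons x t ih =>
      intro s h
      simp only [List.foldl_cons]
      have hx : x ∉ s := by
        intro hmem
        have := List.Nodup.disjoint h (a := x)
        exact absurd (List.mem_cons_self) (this hmem)
      have hadd : PySem.Set.add s x = s ++ [x] := by
        unfold PySem.Set.add
        exact if_neg (fun hc => hx (List.contains_iff_mem.mp hc))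
      rw [hadd, ih (s ++ [x]) (by simpa using h)]
      simp

lemma pv_ofList_nodup (l : List Int) (h : l.Nodup) : PySem.Set.ofList l = l := by
  unfold PySem.Set.ofList
  have := pv_ofList_aux l [] (by simpa using h)
  simpa [PySem.Set.empty] using this

lemma pv_sel_comm (pats : List (List (List Int))) (f : List (List Int) → List (List Int)) (g : List (List Int)) :
    pvSel pats (fun o => decide (f o = g)) = pvSel pats (fun o => decide (g = f o)) := by
  unfold pvSel
  congr 1
  apply List.filter_congr
  intro jp _
  simp [eq_comm]

lemma pvB_eq_canon (pats : List (List (List Int))) : create_adjacency_alt pats = pvCanon pats := by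
  unfold create_adjacency_alt pvCanon
  apply List.map_congr_left
  intro p _
  rw [pv_indexBy_getD, pv_indexBy_getD, pv_indexBy_getD, pv_indexBy_getD,
      pv_ofList_nodup _ (pv_sel_nodup _ _), pv_ofList_nodup _ (pv_sel_nodup _ _),
      pv_ofList_nodup _ (pv_sel_nodup _ _), pv_ofList_nodup _ (pv_sel_nodup _ _),
      pv_sel_comm pats pvB_rdl (pvB_rdf p), pv_sel_comm pats pvB_cdf (pvB_cdl p)]

-- ==== A equals the canonical form ====
def pvPairs (pats : List (List (List Int))) : List ((Int × List (List Int)) × (Int × List (List Int))) :=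
  (PySem.List.enumerate pats).flatMap (fun it => (PySem.List.enumerate pats).map (fun jo => (it, jo)))

def pvStepA (adj : List (List (List Int))) (it jo : Int × List (List Int)) : List (List (List Int)) :=
  if pvA_rdl it.2 = pvA_rdf jo.2 then
    pvAddAt (pvAddAt (if pvA_cdf it.2 = pvA_cdl jo.2 then
        pvAddAt (pvAddAt adj it.1.toNat 1 jo.1) jo.1.toNat 3 it.1 else adj) it.1.toNat 0 jo.1) jo.1.toNat 2 it.1
  else
    (if pvA_cdf it.2 = pvA_cdl jo.2 then
        pvAddAt (pvAddAt adj it.1.toNat 1 jo.1) jo.1.toNat 3 it.1 else adj)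

def pvInit (pats : List (List (List Int))) : List (List (List Int)) :=
  pats.map (fun _ => [[], [], [], []])

lemma pvA_eq_pairs (pats : List (List (List Int))) :
    create_adjacency pats = (pvPairs pats).foldl (fun adj pr => pvStepA adj pr.1 pr.2) (pvInit pats) := by
  have h0 : create_adjacency pats = (PySem.List.enumerate pats).foldl
      (fun adj it => (PySem.List.enumerate pats).foldl (fun adj jo => pvStepA adj it jo) adj)
      (pvInit pats) := rfl
  rw [h0]
  unfold pvPairs
  have hfun : (fun (acc : List (List (List Int))) (x : Int × List (List Int)) =>
      List.foldl (fun adj pr => pvStepA adj pr.1 pr.2) acc ((PySem.List.enumerate pats).map (fun jo => (x, jo))))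
    = (fun adj it => (PySem.List.enumerate pats).foldl (fun adj jo => pvStepA adj it jo) adj) := by
    funext acc x
    rw [List.foldl_map]
  rw [List.foldl_flatMap, hfun]

def pvCell (adj : List (List (List Int))) (p d : Nat) : List Int :=
  ((adj[p]?.getD [])[d]?).getD []

def pvGood (adj : List (List (List Int))) : Prop :=
  ∀ (p : Nat) (r : List (List Int)), adj[p]? = some r → r.length = 4

lemma pv_good_addAt {adj : List (List (List Int))} (h : pvGood adj) (i d : Nat) (v : Int) :
    pvGood (pvAddAt adj i d v) := by
  intro p r hr
  unfold pvAddAt at hr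
  rw [List.getElem?_modify] at hr
  obtain ⟨r0, hpr, hfr⟩ := Option.map_eq_some_iff.mp hr
  have hfr' : (if i = p then r0.modify d (fun s => PySem.Set.add s v) else r0) = r := hfr
  by_cases hip : i = p
  · rw [if_pos hip] at hfr'
    rw [← hfr', List.length_modify]
    exact h p r0 hpr
  · rw [if_neg hip] at hfr'
    rw [← hfr']
    exact h p r0 hpr

lemma pv_len_addAt (adj : List (List (List Int))) (i d : Nat) (v : Int) :
    (pvAddAt adj i d v).length = adj.length := by
  unfold pvAddAt; exact List.length_modify _ _ _

lemma pv_cell_addAt {adj : List (List (List Int))} (h : pvGood adj) {i : Nat} (hi : i < adj.length)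
    {d : Nat} (hd : d < 4) (v : Int) (p e : Nat) :
    pvCell (pvAddAt adj i d v) p e =
      if p = i ∧ e = d then PySem.Set.add (pvCell adj p e) v else pvCell adj p e := by
  unfold pvCell pvAddAt
  rw [List.getElem?_modify]
  by_cases hip : i = p
  · subst hip
    have hr : adj[i]? = some (adj[i]'hi) := List.getElem?_eq_getElem hi
    have hlen := h i _ hr
    rw [hr]
    simp only [Option.getD_some, true_and, if_true]
    rw [show ((fun a : List (List Int) => a.modify d fun s => PySem.Set.add s v) <$> some (adj[i]'hi))
          = some ((adj[i]'hi).modify d fun s => PySem.Set.add s v) from rfl]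
    simp only [Option.getD_some]
    rw [List.getElem?_modify]
    by_cases hde : e = d
    · subst hde
      have h2 : (adj[i]'hi)[e]? = some ((adj[i]'hi)[e]'(by omega)) := List.getElem?_eq_getElem (by omega)
      rw [h2]
      simp
    · simp only [if_neg hde]
      have hde' : ¬ d = e := fun hh => hde hh.symm
      simp [hde']
  · have hne : ¬ (p = i ∧ e = d) := fun hc => hip hc.1.symm
    simp [hip, hne]

def pvHit (p e : Nat) (pr : (Int × List (List Int)) × (Int × List (List Int))) : Bool :=
  match e with
  | 0 => decide (p = pr.1.1.toNat) && decide (pvA_rdl pr.1.2 = pvA_rdf pr.2.2)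
  | 1 => decide (p = pr.1.1.toNat) && decide (pvA_cdf pr.1.2 = pvA_cdl pr.2.2)
  | 2 => decide (p = pr.2.1.toNat) && decide (pvA_rdl pr.1.2 = pvA_rdf pr.2.2)
  | 3 => decide (p = pr.2.1.toNat) && decide (pvA_cdf pr.1.2 = pvA_cdl pr.2.2)
  | _ => false

def pvVal (e : Nat) (pr : (Int × List (List Int)) × (Int × List (List Int))) : Int :=
  match e with
  | 0 => pr.2.1
  | 1 => pr.2.1
  | _ => pr.1.1

lemma pv_good_step {adj : List (List (List Int))} (h : pvGood adj) (it jo : Int × List (List Int)) :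
    pvGood (pvStepA adj it jo) := by
  unfold pvStepA
  split_ifs <;>
    first
      | exact pv_good_addAt (pv_good_addAt (pv_good_addAt (pv_good_addAt h _ _ _) _ _ _) _ _ _) _ _ _
      | exact pv_good_addAt (pv_good_addAt h _ _ _) _ _ _
      | exact h

lemma pv_len_step (adj : List (List (List Int))) (it jo : Int × List (List Int)) :
    (pvStepA adj it jo).length = adj.length := by
  unfold pvStepA
  split_ifs <;> simp [pv_len_addAt]

lemma pv_cell_step {adj : List (List (List Int))} (h : pvGood adj)
    {it jo : Int × List (List Int)} (hi : it.1.toNat < adj.length) (hj : jo.1.toNat < adj.length)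
    {e : Nat} (he : e < 4) (p : Nat) :
    pvCell (pvStepA adj it jo) p e =
      if pvHit p e (it, jo) then PySem.Set.add (pvCell adj p e) (pvVal e (it, jo)) else pvCell adj p e := by
  unfold pvStepA
  by_cases hH : pvA_cdf it.2 = pvA_cdl jo.2 <;> by_cases hV : pvA_rdl it.2 = pvA_rdf jo.2
  · rw [if_pos hV, if_pos hH]
    rw [pv_cell_addAt (pv_good_addAt (pv_good_addAt (pv_good_addAt h _ _ _) _ _ _) _ _ _)
          (by simpa [pv_len_addAt] using hj) (by omega) _ p e]
    rw [pv_cell_addAt (pv_good_addAt (pv_good_addAt h _ _ _) _ _ _)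
          (by simpa [pv_len_addAt] using hi) (by omega) _ p e]
    rw [pv_cell_addAt (pv_good_addAt h _ _ _) (by simpa [pv_len_addAt] using hj) (by omega) _ p e]
    rw [pv_cell_addAt h hi (by omega) _ p e]
    interval_cases e <;> by_cases hpi : p = it.1.toNat <;> by_cases hpj : p = jo.1.toNat <;>
      simp [pvHit, pvVal, hH, hV, hpi, hpj]
  · rw [if_neg hV, if_pos hH]
    rw [pv_cell_addAt (pv_good_addAt h _ _ _) (by simpa [pv_len_addAt] using hj) (by omega) _ p e]
    rw [pv_cell_addAt h hi (by omega) _ p e]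
    interval_cases e <;> by_cases hpi : p = it.1.toNat <;> by_cases hpj : p = jo.1.toNat <;>
      simp [pvHit, pvVal, hH, hV, hpi, hpj]
  · rw [if_pos hV, if_neg hH]
    rw [pv_cell_addAt (pv_good_addAt h _ _ _) (by simpa [pv_len_addAt] using hj) (by omega) _ p e]
    rw [pv_cell_addAt h hi (by omega) _ p e]
    interval_cases e <;> by_cases hpi : p = it.1.toNat <;> by_cases hpj : p = jo.1.toNat <;>
      simp [pvHit, pvVal, hH, hV, hpi, hpj]
  · rw [if_neg hV, if_neg hH]
    interval_cases e <;> by_cases hpi : p = it.1.toNat <;> by_cases hpj : p = jo.1.toNat <;>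
      simp [pvHit, hH, hV, hpi, hpj]

lemma pv_cell_foldl (n : Nat) :
    ∀ (L : List ((Int × List (List Int)) × (Int × List (List Int)))) (adj : List (List (List Int))),
      pvGood adj → adj.length = n →
      (∀ pr ∈ L, pr.1.1.toNat < n ∧ pr.2.1.toNat < n) →
      ∀ {e : Nat}, e < 4 → ∀ (p : Nat),
      pvCell (L.foldl (fun adj pr => pvStepA adj pr.1 pr.2) adj) p e =
        L.foldl (fun s pr => if pvHit p e pr then PySem.Set.add s (pvVal e pr) else s) (pvCell adj p e) := by
  intro L
  induction L with
  | nil => intro adj _ _ _ e _ p; rfl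
  | cons x t ih =>
      intro adj hg hlen hmem e he p
      simp only [List.foldl_cons]
      have hx := hmem x List.mem_cons_self
      rw [ih (pvStepA adj x.1 x.2) (pv_good_step hg _ _) (by rw [pv_len_step]; exact hlen)
            (fun pr hpr => hmem pr (List.mem_cons_of_mem _ hpr)) he p]
      rw [pv_cell_step hg (by omega) (by omega) he p]

lemma pv_foldl_add_if {b : Type} (hit : b → Bool) (val : b → Int) :
    ∀ (L : List b) (s : List Int), (s ++ (L.filter hit).map val).Nodup →
      L.foldl (fun s x => if hit x then PySem.Set.add s (val x) else s) s = s ++ (L.filter hit).map val := by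
  intro L
  induction L with
  | nil => intro s _; simp
  | cons x t ih =>
      intro s h
      simp only [List.foldl_cons, List.filter_cons] at h ⊢
      cases hx : hit x with
      | false =>
          simp only [hx, Bool.false_eq_true, if_false] at h ⊢
          exact ih s h
      | true =>
          simp only [hx, if_true, List.map_cons] at h ⊢
          have hvx : val x ∉ s := by
            intro hmem
            exact absurd List.mem_cons_self ((List.Nodup.disjoint h) hmem)
          have hadd : PySem.Set.add s (val x) = s ++ [val x] := by
            unfold PySem.Set.add
            rw [if_neg (by simpa [List.contains_iff_mem] using hvx)]
          rw [hadd, ih (s ++ [val x]) (by simpa using h)]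
          simp

lemma pv_pairs_mem (pats : List (List (List Int))) :
    ∀ pr ∈ pvPairs pats, pr.1.1.toNat < pats.length ∧ pr.2.1.toNat < pats.length := by
  intro pr hpr
  unfold pvPairs at hpr
  rw [pv_enum_eq_zipIdx] at hpr
  simp only [List.mem_flatMap, List.mem_map] at hpr
  obtain ⟨it, ⟨xk1, hxk1, rfl⟩, jo, ⟨xk2, hxk2, rfl⟩, rfl⟩ := hpr
  obtain ⟨xk1a, xk1b⟩ := xk1
  obtain ⟨xk2a, xk2b⟩ := xk2
  have h1 := List.mem_zipIdx hxk1
  have h2 := List.mem_zipIdx hxk2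
  constructor
  · simp only [Int.toNat_natCast]; omega
  · simp only [Int.toNat_natCast]; omega

lemma pv_canon_row (pats : List (List (List Int))) (p : Nat) (hp : p < pats.length) :
    (pvCanon pats)[p]'(by simpa [pvCanon] using hp) =
      [pvSel pats (fun o => decide (pvB_rdl (pats[p]'hp) = pvB_rdf o)),
       pvSel pats (fun o => decide (pvB_cdf (pats[p]'hp) = pvB_cdl o)),
       pvSel pats (fun t => decide (pvB_rdl t = pvB_rdf (pats[p]'hp))),
       pvSel pats (fun t => decide (pvB_cdf t = pvB_cdl (pats[p]'hp)))] := by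
  unfold pvCanon
  rw [List.getElem_map]

-- the value list accumulated into cell (p, e)
lemma pv_pairs_val (pats : List (List (List Int))) (p : Nat) (hp : p < pats.length) :
    ∀ e, e < 4 →
    ((pvPairs pats).filter (pvHit p e)).map (pvVal e) =
      ((pvCanon pats)[p]'(by simpa [pvCanon] using hp)).getD e [] := by
  intro e he
  rw [pv_canon_row pats p hp]
  rw [pv_map_filter_eq_flatMap]
  unfold pvPairs
  rw [List.flatMap_assoc]
  simp only [List.flatMap_map]
  interval_cases e
  · -- e = 0 : vertical, outer-indexed
    simp only [List.getD_cons_zero]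
    have hinner : ∀ it : Int × List (List Int),
        (PySem.List.enumerate pats).flatMap (fun jo => if pvHit p 0 (it, jo) then [pvVal 0 (it, jo)] else [])
          = if it.1.toNat = p
              then (fun t : List (List Int) => (PySem.List.enumerate pats).flatMap
                      (fun jo => if decide (pvA_rdl t = pvA_rdf jo.2) then [jo.1] else [])) it.2
              else [] := by
      intro it
      by_cases hip : it.1.toNat = p
      · rw [if_pos hip]
        congr 1
        funext jo
        simp [pvHit, pvVal, hip]
      · rw [if_neg hip]
        have hp' : ¬ p = it.1.toNat := fun h => hip h.symm
        simp [pvHit, hp']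
    simp only [hinner]
    rw [pv_sel_eq_flatMap]
    refine (pv_enum_flatMap_single (fun t : List (List Int) =>
        (PySem.List.enumerate pats).flatMap (fun jo => if decide (pvA_rdl t = pvA_rdf jo.2) then [jo.1] else [])) pats p hp).trans ?_
    simp only [pvA_rdl_eq, pvA_rdf_eq]
  · -- e = 1 : horizontal, outer-indexed
    simp only [List.getD_cons_succ, List.getD_cons_zero]
    have hinner : ∀ it : Int × List (List Int),
        (PySem.List.enumerate pats).flatMap (fun jo => if pvHit p 1 (it, jo) then [pvVal 1 (it, jo)] else [])
          = if it.1.toNat = p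
              then (fun t : List (List Int) => (PySem.List.enumerate pats).flatMap
                      (fun jo => if decide (pvA_cdf t = pvA_cdl jo.2) then [jo.1] else [])) it.2
              else [] := by
      intro it
      by_cases hip : it.1.toNat = p
      · rw [if_pos hip]
        congr 1
        funext jo
        simp [pvHit, pvVal, hip]
      · rw [if_neg hip]
        have hp' : ¬ p = it.1.toNat := fun h => hip h.symm
        simp [pvHit, hp']
    simp only [hinner]
    rw [pv_sel_eq_flatMap]
    refine (pv_enum_flatMap_single (fun t : List (List Int) =>
        (PySem.List.enumerate pats).flatMap (fun jo => if decide (pvA_cdf t = pvA_cdl jo.2) then [jo.1] else [])) pats p hp).trans ?_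
    simp only [pvA_cdf_eq, pvA_cdl_eq]
  · -- e = 2 : vertical, inner-indexed
    simp only [List.getD_cons_succ, List.getD_cons_zero]
    have hinner : ∀ it : Int × List (List Int),
        (PySem.List.enumerate pats).flatMap (fun jo => if pvHit p 2 (it, jo) then [pvVal 2 (it, jo)] else [])
          = if decide (pvA_rdl it.2 = pvA_rdf (pats[p]'hp)) then [it.1] else [] := by
      intro it
      have hstep : (fun jo : Int × List (List Int) => if pvHit p 2 (it, jo) then [pvVal 2 (it, jo)] else [])
          = (fun jo : Int × List (List Int) => if jo.1.toNat = p
              then (fun o : List (List Int) => if decide (pvA_rdl it.2 = pvA_rdf o) then [it.1] else []) jo.2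
              else []) := by
        funext jo
        by_cases hjp : jo.1.toNat = p
        · simp [pvHit, pvVal, hjp]
        · have hp' : ¬ p = jo.1.toNat := fun h => hjp h.symm
          simp [pvHit, hjp, hp']
      rw [hstep]
      exact pv_enum_flatMap_single (fun o : List (List Int) =>
        if decide (pvA_rdl it.2 = pvA_rdf o) then [it.1] else []) pats p hp
    simp only [hinner]
    rw [pv_sel_eq_flatMap]
    simp only [pvA_rdl_eq, pvA_rdf_eq]
  · -- e = 3 : horizontal, inner-indexed
    simp only [List.getD_cons_succ, List.getD_cons_zero]
    have hinner : ∀ it : Int × List (List Int),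
        (PySem.List.enumerate pats).flatMap (fun jo => if pvHit p 3 (it, jo) then [pvVal 3 (it, jo)] else [])
          = if decide (pvA_cdf it.2 = pvA_cdl (pats[p]'hp)) then [it.1] else [] := by
      intro it
      have hstep : (fun jo : Int × List (List Int) => if pvHit p 3 (it, jo) then [pvVal 3 (it, jo)] else [])
          = (fun jo : Int × List (List Int) => if jo.1.toNat = p
              then (fun o : List (List Int) => if decide (pvA_cdf it.2 = pvA_cdl o) then [it.1] else []) jo.2
              else []) := by
        funext jo
        by_cases hjp : jo.1.toNat = p
        · simp [pvHit, pvVal, hjp]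
        · have hp' : ¬ p = jo.1.toNat := fun h => hjp h.symm
          simp [pvHit, hjp, hp']
      rw [hstep]
      exact pv_enum_flatMap_single (fun o : List (List Int) =>
        if decide (pvA_cdf it.2 = pvA_cdl o) then [it.1] else []) pats p hp
    simp only [hinner]
    rw [pv_sel_eq_flatMap]
    simp only [pvA_cdf_eq, pvA_cdl_eq]

lemma pv_good_init (pats : List (List (List Int))) : pvGood (pvInit pats) := by
  intro q r hr
  unfold pvInit at hr
  rw [List.getElem?_map] at hr
  obtain ⟨r0, _, hfr⟩ := Option.map_eq_some_iff.mp hr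
  rw [← hfr]
  rfl

lemma pv_len_init (pats : List (List (List Int))) : (pvInit pats).length = pats.length := by
  unfold pvInit; simp

lemma pv_cell_init (pats : List (List (List Int))) (p e : Nat) (hp : p < pats.length) (he : e < 4) :
    pvCell (pvInit pats) p e = [] := by
  unfold pvCell pvInit
  rw [List.getElem?_map, List.getElem?_eq_getElem hp]
  interval_cases e <;> rfl

lemma pv_canon_entry_nodup (pats : List (List (List Int))) (p e : Nat) (hp : p < pats.length) :
    (((pvCanon pats)[p]'(by simpa [pvCanon] using hp)).getD e []).Nodup := by
  rw [pv_canon_row pats p hp]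
  match e with
  | 0 => simpa using pv_sel_nodup _ _
  | 1 => simpa using pv_sel_nodup _ _
  | 2 => simpa using pv_sel_nodup _ _
  | 3 => simpa using pv_sel_nodup _ _
  | (n+4) => rw [List.getD_eq_getElem?_getD]; simp

lemma pv_len_foldl (L : List ((Int × List (List Int)) × (Int × List (List Int)))) :
    ∀ (adj : List (List (List Int))),
      (L.foldl (fun adj pr => pvStepA adj pr.1 pr.2) adj).length = adj.length := by
  induction L with
  | nil => intro adj; rfl
  | cons x t ih => intro adj; simp only [List.foldl_cons]; rw [ih, pv_len_step]

lemma pv_good_foldl (L : List ((Int × List (List Int)) × (Int × List (List Int)))) :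
    ∀ (adj : List (List (List Int))), pvGood adj →
      pvGood (L.foldl (fun adj pr => pvStepA adj pr.1 pr.2) adj) := by
  induction L with
  | nil => intro adj h; exact h
  | cons x t ih => intro adj h; simp only [List.foldl_cons]; exact ih _ (pv_good_step h _ _)

lemma pv_cell_canon (pats : List (List (List Int))) (p e : Nat) (hp : p < pats.length) (he : e < 4) :
    pvCell (create_adjacency pats) p e = ((pvCanon pats)[p]'(by simpa [pvCanon] using hp)).getD e [] := by
  rw [pvA_eq_pairs]
  rw [pv_cell_foldl pats.length (pvPairs pats) (pvInit pats) (pv_good_init pats) (pv_len_init pats)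
        (pv_pairs_mem pats) he p]
  rw [pv_cell_init pats p e hp he]
  rw [pv_foldl_add_if (pvHit p e) (pvVal e) (pvPairs pats) []
        (by simp only [List.nil_append]; rw [pv_pairs_val pats p hp e he]; exact pv_canon_entry_nodup pats p e hp)]
  simp only [List.nil_append]
  exact pv_pairs_val pats p hp e he

lemma pvA_eq_canon (pats : List (List (List Int))) : create_adjacency pats = pvCanon pats := by
  have hlenA : (create_adjacency pats).length = pats.length := by
    rw [pvA_eq_pairs, pv_len_foldl, pv_len_init]
  have hlenC : (pvCanon pats).length = pats.length := by
    unfold pvCanon; simp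
  apply List.ext_getElem (by rw [hlenA, hlenC])
  intro p h1 h2
  have hp : p < pats.length := by omega
  have hgood : pvGood (create_adjacency pats) := by
    rw [pvA_eq_pairs]; exact pv_good_foldl _ _ (pv_good_init pats)
  have hrA : (create_adjacency pats)[p]? = some ((create_adjacency pats)[p]'h1) :=
    List.getElem?_eq_getElem h1
  have hlen4 : ((create_adjacency pats)[p]'h1).length = 4 := hgood p _ hrA
  have hlenC4 : ((pvCanon pats)[p]'h2).length = 4 := by
    unfold pvCanon
    rw [List.getElem_map]
    rfl
  apply List.ext_getElem (by rw [hlen4, hlenC4])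
  intro e he1 he2
  have he : e < 4 := by omega
  have hcell : pvCell (create_adjacency pats) p e = ((create_adjacency pats)[p]'h1)[e]'he1 := by
    unfold pvCell
    rw [hrA]
    simp only [Option.getD_some]
    rw [List.getElem?_eq_getElem he1]
    rfl
  have hgetD : ((pvCanon pats)[p]'h2).getD e [] = ((pvCanon pats)[p]'h2)[e]'he2 :=
    List.getD_eq_getElem _ _ he2
  rw [← hcell, ← hgetD]
  exact pv_cell_canon pats p e hp he

-- ===== VERDICT (by name: the statement is the Claim_ definition above) =====
theorem create_adjacency_spec : Claim_equal_create_adjacency := by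
  intro pats _
  unfold Spec_create_adjacency
  rw [pvB_eq_canon, pvA_eq_canon]
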